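-- pv_equiv track=rewrite | github.com/Butskov/Bioinformatics-Algorithms | week7-8/20 - ConvolutionCyclopeptideSequencing.py | linearscore
-- ===== SOURCE A (Python) =====
-- def linear_spectrum(peptide):
--     prefix_mass = [0 for i in range(len(peptide) + 1)]
--     for i in range(len(peptide)):
--         prefix_mass[i + 1] = prefix_mass[i] + peptide[i]
--     lin_spectrum = []
--     for i in range(len(peptide)):
--         for j in range(i + 1, len(peptide) + 1):
--             lin_spectrum.append(prefix_mass[j] - prefix_mass[i])
--     lin_spectrum.append(0)
--     lin_spectrum = sorted(lin_spectrum)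
--     return lin_spectrum
--
-- def linearscore(peptide, spectrum):
--     ls = linear_spectrum(peptide)
--     cs = spectrum.copy()
--     score = 0
--     for c in ls:
--         if c in cs:
--             score += 1
--             cs.remove(c)
--     return score
-- ===== SOURCE B (Python) =====
-- def linearscore(peptide, spectrum):
--     # Count each sub-peptide mass once (running window sums, no prefix array,
--     # no sort), count the spectrum, and sum per-mass minima.
--     n = len(peptide)
--     masses = [0]
--     for i in range(n):
--         s = 0
--         for j in range(i, n):
--             s += peptide[j]
--             masses.append(s)
--     need = {}
--     for m in masses:
--         need[m] = need.get(m, 0) + 1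
--     have = {}
--     for m in spectrum:
--         have[m] = have.get(m, 0) + 1
--     return sum(min(c, have.get(m, 0)) for m, c in need.items())
-- ===== Notes on version B (the rewrite author's own statement) =====
-- stated objective: faster
-- what changed: B scores by building count dictionaries of the sub-peptide masses (running window sums, no prefix array, no sort) and of the spectrum and summing per-mass minima, instead of A's sort followed by a membership-and-remove scan of a mutating copy of the spectrum.
import Mathlib
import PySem

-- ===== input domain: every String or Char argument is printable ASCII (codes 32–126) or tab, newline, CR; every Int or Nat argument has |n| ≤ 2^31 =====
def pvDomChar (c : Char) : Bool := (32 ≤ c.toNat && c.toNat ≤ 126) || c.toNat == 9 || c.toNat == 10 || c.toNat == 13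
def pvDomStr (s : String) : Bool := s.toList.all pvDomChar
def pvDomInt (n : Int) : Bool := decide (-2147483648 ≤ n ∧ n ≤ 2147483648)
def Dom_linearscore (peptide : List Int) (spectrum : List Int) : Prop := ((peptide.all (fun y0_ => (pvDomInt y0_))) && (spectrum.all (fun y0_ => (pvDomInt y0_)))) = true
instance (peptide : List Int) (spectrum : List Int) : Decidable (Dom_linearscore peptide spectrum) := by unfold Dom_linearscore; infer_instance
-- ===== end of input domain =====

-- Faster B: counting dictionaries and a sum of per-mass minima (multiset intersection
-- size) built from running window sums, replacing A's sort plus the quadratic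
-- membership-and-remove scan over a mutating copy of the spectrum.

-- ===== PORT A =====
-- prefix_mass[i] = v : exact for 0 ≤ i < len xs, the only indices A's loop assigns
def pySet (xs : List Int) (i : Int) (v : Int) : List Int := xs.set i.toNat v

def linear_spectrum (peptide : List Int) : List Int :=
  let n : Int := PySem.List.len peptide
  let prefix_mass : List Int := (PySem.List.pyRange 0 (n + 1) 1).map (fun _ => 0)
  let prefix_mass := (PySem.List.pyRange 0 n 1).foldl
    (fun pm i => pySet pm (i + 1) (PySem.List.pyGetD pm i 0 + PySem.List.pyGetD peptide i 0))
    prefix_mass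
  let lin_spectrum : List Int := []
  let lin_spectrum := (PySem.List.pyRange 0 n 1).foldl
    (fun acc i => (PySem.List.pyRange (i + 1) (n + 1) 1).foldl
      (fun acc j =>
        acc ++ [PySem.List.pyGetD prefix_mass j 0 - PySem.List.pyGetD prefix_mass i 0]) acc)
    lin_spectrum
  let lin_spectrum := lin_spectrum ++ [0]
  PySem.List.sorted lin_spectrum (fun x => x) false

def linearscore (peptide : List Int) (spectrum : List Int) : Int :=
  let ls := linear_spectrum peptide
  -- cs = spectrum.copy(); 'c in cs' then cs.remove(c) = erase the first occurrence
  -- (PySem.List.remove?_eq_some_erase: remove? after the membership test is List.erase)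
  (ls.foldl (fun (st : Int × List Int) c =>
      if st.2.contains c then (st.1 + 1, st.2.erase c) else st) (0, spectrum)).1

-- ===== PORT B =====
def linearscore_alt (peptide : List Int) (spectrum : List Int) : Int :=
  let n : Int := PySem.List.len peptide
  let masses := (PySem.List.pyRange 0 n 1).foldl
    (fun ms i =>
      ((PySem.List.pyRange i n 1).foldl
        (fun (st : Int × List Int) j =>
          (st.1 + PySem.List.pyGetD peptide j 0,
           st.2 ++ [st.1 + PySem.List.pyGetD peptide j 0]))
        (0, ms)).2)
    [0]
  -- need[m] = need.get(m, 0) + 1  is  Dict.modify m 0 (· + 1)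
  let need := masses.foldl (fun d m => PySem.Dict.modify d m 0 (· + 1)) PySem.Dict.empty
  let haveD := spectrum.foldl (fun d m => PySem.Dict.modify d m 0 (· + 1)) PySem.Dict.empty
  (need.items.map (fun p => min p.2 (PySem.Dict.getD haveD p.1 0))).sum

-- ===== PRECONDITION & SPEC =====
def Spec_linearscore (peptide : List Int) (spectrum : List Int) (out : Int) : Prop := out = linearscore_alt peptide spectrum
instance (peptide : List Int) (spectrum : List Int) (out : Int) : Decidable (Spec_linearscore peptide spectrum out) := by unfold Spec_linearscore; infer_instance

-- ===== CLAIM (what is proved, stated in full; the proofs are below) =====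
def Claim_equal_linearscore : Prop := ∀ (peptide : List Int) (spectrum : List Int), Dom_linearscore peptide spectrum → Spec_linearscore peptide spectrum (linearscore peptide spectrum)

-- ===== LEMMAS AND PROOFS =====

-- prefix sums of the peptide
def pvPre (peptide : List Int) (k : Nat) : Int := (peptide.take k).sum

theorem pvPre_succ (peptide : List Int) (a : Nat) (h : a < peptide.length) :
    pvPre peptide (a + 1) = pvPre peptide a + peptide[a] := by
  simp [pvPre, List.sum_take_succ _ _ h]

-- the flat list of sub-peptide masses, in the order A generates them
def pvFlatA (peptide : List Int) : List Int :=
  (PySem.List.pyRange 0 (peptide.length : Int) 1).flatMap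
    (fun i => (PySem.List.pyRange (i + 1) ((peptide.length : Int) + 1) 1).map
      (fun j => pvPre peptide j.toNat - pvPre peptide i.toNat))

-- A's prefix_mass loop computes the prefix sums
theorem pvPrefixInv (peptide : List Int) :
    ∀ (m : Nat), m ≤ peptide.length →
    ((PySem.List.pyRange 0 (m : Int) 1).foldl
      (fun pm i => pySet pm (i + 1) (PySem.List.pyGetD pm i 0 + PySem.List.pyGetD peptide i 0))
      ((PySem.List.pyRange 0 ((peptide.length : Int) + 1) 1).map (fun _ => 0)))
    = (List.range (peptide.length + 1)).map (fun t => if t ≤ m then pvPre peptide t else 0) := by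
  intro m
  induction m with
  | zero =>
    intro _
    rw [show PySem.List.pyRange 0 ((0 : Nat) : Int) 1 = [] from PySem.List.pyRange_one_eq_nil (by simp)]
    simp only [List.foldl_nil]
    apply List.ext_getElem
    · simp [PySem.List.length_pyRange_one]
    · intro t h1 h2
      simp only [List.getElem_map, List.getElem_range]
      split
      · next h => interval_cases t; simp [pvPre]
      · rfl
  | succ m ih =>
    intro hm
    rw [show ((m + 1 : Nat) : Int) = (m : Int) + 1 by push_cast; ring]
    rw [show PySem.List.pyRange 0 ((m : Int) + 1) 1 = PySem.List.pyRange 0 (m : Int) 1 ++ [(m : Int)] from PySem.List.pyRange_one_succ_right (by positivity)]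
    rw [List.foldl_append, ih (by omega)]
    simp only [List.foldl_cons, List.foldl_nil]
    have hgetpm : PySem.List.pyGetD ((List.range (peptide.length + 1)).map
        (fun t => if t ≤ m then pvPre peptide t else 0)) (m : Int) 0 = pvPre peptide m := by
      rw [PySem.List.pyGetD_natCast]
      rw [List.getD_eq_getElem _ _ (by simp; omega)]
      simp
    have hgetp : PySem.List.pyGetD peptide (m : Int) 0 = peptide[m]'(by omega) := by
      rw [PySem.List.pyGetD_natCast]
      exact List.getD_eq_getElem _ _ (by omega)
    rw [hgetpm, hgetp]
    unfold pySet
    rw [show ((m : Int) + 1).toNat = m + 1 by omega]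
    apply List.ext_getElem
    · simp
    · intro t h1 h2
      simp only [List.getElem_set, List.getElem_map, List.getElem_range]
      simp only [List.length_set, List.length_map, List.length_range] at h1
      by_cases he : m + 1 = t
      · rw [if_pos he]
        subst he
        rw [if_pos (by omega)]
        rw [pvPre_succ peptide m (by omega)]
      · rw [if_neg he]
        by_cases hle : t ≤ m
        · rw [if_pos hle, if_pos (by omega)]
        · rw [if_neg hle, if_neg (by omega)]

-- A's lin_spectrum before sorting is pvFlatA ++ [0]
theorem pvLinA (peptide : List Int) :
    linear_spectrum peptide
      = PySem.List.sorted (pvFlatA peptide ++ [0]) (fun x => x) false := by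
  unfold linear_spectrum
  simp only [PySem.List.len]
  rw [pvPrefixInv peptide peptide.length le_rfl]
  congr 1
  congr 1
  have hstep : (PySem.List.pyRange 0 (peptide.length : Int) 1).foldl
      (fun acc i => (PySem.List.pyRange (i + 1) ((peptide.length : Int) + 1) 1).foldl
        (fun acc j =>
          acc ++ [PySem.List.pyGetD ((List.range (peptide.length + 1)).map
              (fun t => if t ≤ peptide.length then pvPre peptide t else 0)) j 0
            - PySem.List.pyGetD ((List.range (peptide.length + 1)).map
              (fun t => if t ≤ peptide.length then pvPre peptide t else 0)) i 0]) acc)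
      ([] : List Int)
    = (PySem.List.pyRange 0 (peptide.length : Int) 1).foldl
      (fun acc i => acc ++ (PySem.List.pyRange (i + 1) ((peptide.length : Int) + 1) 1).map
        (fun j => pvPre peptide j.toNat - pvPre peptide i.toNat))
      ([] : List Int) := by
    apply PySem.List.foldl_congr_mem
    intro acc i hi
    have h01 : (0 : Int) ≤ i ∧ i < (peptide.length : Int) := by
      simpa [PySem.List.mem_pyRange_one] using hi
    rw [PySem.List.foldl_append_singleton_eq_map]
    congr 1
    apply List.map_congr_left
    intro j hj
    have hj' : i + 1 ≤ j ∧ j < (peptide.length : Int) + 1 := by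
      simpa [PySem.List.mem_pyRange_one] using hj
    have hgj : PySem.List.pyGetD ((List.range (peptide.length + 1)).map
        (fun t => if t ≤ peptide.length then pvPre peptide t else 0)) j 0 = pvPre peptide j.toNat := by
      rw [show j = ((j.toNat : Nat) : Int) by omega, PySem.List.pyGetD_natCast]
      rw [List.getD_eq_getElem _ _ (by simp; omega)]
      simp only [List.getElem_map, List.getElem_range]
      rw [if_pos (by omega)]
      congr 1
    have hgi : PySem.List.pyGetD ((List.range (peptide.length + 1)).map
        (fun t => if t ≤ peptide.length then pvPre peptide t else 0)) i 0 = pvPre peptide i.toNat := by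
      rw [show i = ((i.toNat : Nat) : Int) by omega, PySem.List.pyGetD_natCast]
      rw [List.getD_eq_getElem _ _ (by simp; omega)]
      simp only [List.getElem_map, List.getElem_range]
      rw [if_pos (by omega)]
      congr 1
    rw [hgj, hgi]
  rw [hstep, PySem.List.foldl_append_eq_flatMap]
  simp [pvFlatA]

-- B's inner running-sum loop appends the window sums starting at a
theorem pvInnerB (peptide : List Int) (k : Nat) :
    ∀ (a : Nat), a ≤ peptide.length → peptide.length - a = k →
    ∀ (s : Int) (acc : List Int),
    ((PySem.List.pyRange (a : Int) (peptide.length : Int) 1).foldl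
        (fun (st : Int × List Int) j =>
          (st.1 + PySem.List.pyGetD peptide j 0,
           st.2 ++ [st.1 + PySem.List.pyGetD peptide j 0]))
        (s, acc))
    = (s + (pvPre peptide peptide.length - pvPre peptide a),
       acc ++ (PySem.List.pyRange (a : Int) (peptide.length : Int) 1).map
          (fun j => s + (pvPre peptide (j.toNat + 1) - pvPre peptide a))) := by
  induction k with
  | zero =>
    intro a ha hk s acc
    have he : a = peptide.length := by omega
    subst he
    rw [PySem.List.pyRange_one_eq_nil (by omega)]
    simp
  | succ k ih =>
    intro a ha hk s acc
    have hlt : (a : Int) < (peptide.length : Int) := by exact_mod_cast (by omega : a < peptide.length)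
    rw [PySem.List.pyRange_one_cons hlt]
    simp only [List.foldl_cons, List.map_cons]
    have hget : PySem.List.pyGetD peptide (a : Int) 0 = peptide[a]'(by omega) := by
      rw [PySem.List.pyGetD_natCast]
      exact List.getD_eq_getElem _ _ (by omega)
    have hstep : s + PySem.List.pyGetD peptide (a : Int) 0
        = s + (pvPre peptide ((a : Int).toNat + 1) - pvPre peptide a) := by
      rw [hget]
      rw [show (a : Int).toNat = a by simp]
      rw [pvPre_succ peptide a (by omega)]
      ring
    rw [hstep]
    have hcast : ((a : Int) + 1) = ((a + 1 : Nat) : Int) := by push_cast; ring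
    rw [hcast, ih (a + 1) (by omega) (by omega)]
    simp only [Int.toNat_natCast, Prod.mk.injEq]
    constructor
    · simp [pvPre]; ring
    · rw [List.append_assoc, List.singleton_append]
      congr 2
      apply List.map_congr_left
      intro j hj
      ring

-- B's masses list is 0 :: pvFlatA
theorem pvMassesB (peptide : List Int) :
    ((PySem.List.pyRange 0 (PySem.List.len peptide) 1).foldl
      (fun ms i =>
        ((PySem.List.pyRange i (PySem.List.len peptide) 1).foldl
          (fun (st : Int × List Int) j =>
            (st.1 + PySem.List.pyGetD peptide j 0,
             st.2 ++ [st.1 + PySem.List.pyGetD peptide j 0]))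
          (0, ms)).2)
      [0])
    = 0 :: pvFlatA peptide := by
  have hstep : (PySem.List.pyRange 0 (PySem.List.len peptide) 1).foldl
      (fun ms i =>
        ((PySem.List.pyRange i (PySem.List.len peptide) 1).foldl
          (fun (st : Int × List Int) j =>
            (st.1 + PySem.List.pyGetD peptide j 0,
             st.2 ++ [st.1 + PySem.List.pyGetD peptide j 0]))
          (0, ms)).2)
      [0]
    = (PySem.List.pyRange 0 (PySem.List.len peptide) 1).foldl
      (fun ms i => ms ++ (PySem.List.pyRange i (peptide.length : Int) 1).map
          (fun j => (0 : Int) + (pvPre peptide (j.toNat + 1) - pvPre peptide i.toNat)))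
      [0] := by
    apply PySem.List.foldl_congr_mem
    intro ms i hi
    have h01 : (0 : Int) ≤ i ∧ i < (peptide.length : Int) := by
      simpa [PySem.List.mem_pyRange_one, PySem.List.len] using hi
    have hi' : i = ((i.toNat : Nat) : Int) := by omega
    rw [show PySem.List.len peptide = (peptide.length : Int) from by simp [PySem.List.len]]
    rw [hi', pvInnerB peptide (peptide.length - i.toNat) i.toNat (by omega) rfl 0 ms]
    simp only [Int.toNat_natCast]
  rw [hstep, PySem.List.foldl_append_eq_flatMap]
  rw [List.singleton_append]
  congr 1
  rw [show PySem.List.len peptide = (peptide.length : Int) from by simp [PySem.List.len]]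
  unfold pvFlatA
  apply List.flatMap_congr
  intro i hi
  have h01 : (0 : Int) ≤ i ∧ i < (peptide.length : Int) := by
    simpa [PySem.List.mem_pyRange_one] using hi
  rw [PySem.List.pyRange_one i (peptide.length : Int), PySem.List.pyRange_one (i+1) ((peptide.length : Int)+1)]
  rw [List.map_map, List.map_map]
  have hlen : ((peptide.length : Int) - i).toNat = ((peptide.length : Int) + 1 - (i+1)).toNat := by omega
  rw [hlen]
  apply List.map_congr_left
  intro k hk
  simp only [Function.comp]
  have e1 : (i + (k : Int)).toNat + 1 = ((i + 1 + (k : Int))).toNat := by omega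
  rw [e1]
  ring

-- A's greedy membership-and-remove loop counts the multiset intersection
theorem pvGreedy (ls cs : List Int) (score : Int) :
    (ls.foldl (fun (st : Int × List Int) c =>
        if st.2.contains c then (st.1 + 1, st.2.erase c) else st) (score, cs)).1
    = score + (((ls : Multiset Int) ∩ (cs : Multiset Int)).card : Int) := by
  induction ls generalizing cs score with
  | nil => simp
  | cons c t ih =>
    simp only [List.foldl_cons]
    by_cases h : c ∈ cs
    · have hc : cs.contains c = true := by simpa using h
      rw [if_pos hc, ih]
      rw [show ((c :: t : List Int) : Multiset Int) = c ::ₘ (t : Multiset Int) from rfl]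
      rw [Multiset.cons_inter_of_pos _ h]
      simp [Multiset.coe_erase]
      ring
    · have hc : ¬ cs.contains c = true := by simpa using h
      rw [if_neg hc, ih]
      rw [show ((c :: t : List Int) : Multiset Int) = c ::ₘ (t : Multiset Int) from rfl]
      rw [Multiset.cons_inter_of_neg _ h]

-- B's sum of per-mass minima over the distinct masses is the intersection size
theorem pvSumMin (M S : List Int) :
    ((PySem.List.dedup M).map
        (fun m => min ((M.count m : Int)) ((S.count m : Int)))).sum
    = (((M : Multiset Int) ∩ (S : Multiset Int)).card : Int) := by
  have h1 : ∀ m : Int, min ((M.count m : Int)) ((S.count m : Int))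
      = (((M : Multiset Int) ∩ (S : Multiset Int)).count m : Int) := by
    intro m
    rw [Multiset.count_inter]
    simp [Multiset.coe_count]
  simp only [h1]
  have hnd : (PySem.List.dedup M).Nodup := PySem.List.nodup_dedup M
  have hmem : ∀ a : Int, a ∈ ((M : Multiset Int) ∩ (S : Multiset Int)) → a ∈ PySem.List.dedup M := by
    intro a ha
    have := Multiset.mem_inter.1 ha
    simpa [PySem.List.mem_dedup] using this.1
  set T : Multiset Int := (M : Multiset Int) ∩ (S : Multiset Int) with hT
  have hF : ((PySem.List.dedup M).map (fun m => ((T.count m : Int)))).sum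
      = ∑ a ∈ (⟨(PySem.List.dedup M : Multiset Int), hnd⟩ : Finset Int), ((T.count a : Int)) := by
    simp [Finset.sum]
  rw [hF]
  have hsub : T.toFinset ⊆ (⟨(PySem.List.dedup M : Multiset Int), hnd⟩ : Finset Int) := by
    intro a ha
    simp only [Multiset.mem_toFinset] at ha
    simpa [Finset.mem_mk] using hmem a ha
  rw [← Finset.sum_subset hsub (by
    intro a _ ha
    simp only [Multiset.mem_toFinset] at ha
    simp [Multiset.count_eq_zero_of_notMem ha])]
  rw [show ∑ a ∈ T.toFinset, ((T.count a : Int)) = ((∑ a ∈ T.toFinset, T.count a : Nat) : Int) by push_cast; rfl]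
  rw [Multiset.toFinset_sum_count_eq]

-- ===== VERDICT (by name: the statement is the Claim_ definition above) =====
theorem linearscore_spec : Claim_equal_linearscore := by
  unfold Claim_equal_linearscore
  intro peptide spectrum _
  unfold Spec_linearscore
  -- A's side
  unfold linearscore
  rw [pvLinA, pvGreedy]
  have hsortm : ((PySem.List.sorted (pvFlatA peptide ++ [0]) (fun x => x) false : List Int) : Multiset Int)
      = ((pvFlatA peptide ++ [0] : List Int) : Multiset Int) :=
    Multiset.coe_eq_coe.2 (PySem.List.sorted_perm _ _ _)
  rw [hsortm]
  -- B's side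
  simp only [linearscore_alt]
  rw [pvMassesB]
  rw [show ((0 :: pvFlatA peptide).foldl (fun d m => PySem.Dict.modify d m 0 (· + 1)) PySem.Dict.empty)
      = PySem.Dict.counter (0 :: pvFlatA peptide) from (PySem.Dict.counter_eq_foldl _).symm]
  rw [show (spectrum.foldl (fun d m => PySem.Dict.modify d m 0 (· + 1)) PySem.Dict.empty)
      = PySem.Dict.counter spectrum from (PySem.Dict.counter_eq_foldl _).symm]
  rw [PySem.Dict.items_eq_map_keys _ (PySem.Dict.nodup_keys_counter _) 0]
  rw [List.map_map]
  have hkeys : (PySem.Dict.counter (0 :: pvFlatA peptide)).keys = PySem.List.dedup (0 :: pvFlatA peptide) := by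
    rw [PySem.Dict.keys_counter]
    simp [PySem.List.dedup_eq_ofList]
  rw [hkeys]
  have hmaps : (PySem.List.dedup (0 :: pvFlatA peptide)).map
        ((fun p : Int × Int => min p.2 (PySem.Dict.getD (PySem.Dict.counter spectrum) p.1 0)) ∘
          (fun k => (k, PySem.Dict.getD (PySem.Dict.counter (0 :: pvFlatA peptide)) k 0)))
      = (PySem.List.dedup (0 :: pvFlatA peptide)).map
        (fun m => min (((0 :: pvFlatA peptide).count m : Int)) ((spectrum.count m : Int))) := by
    apply List.map_congr_left
    intro m _
    simp only [Function.comp]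
    rw [PySem.Dict.getD_counter, PySem.Dict.getD_counter]
  rw [hmaps, pvSumMin]
  have hm : ((0 :: pvFlatA peptide : List Int) : Multiset Int)
      = ((pvFlatA peptide ++ [0] : List Int) : Multiset Int) :=
    Multiset.coe_eq_coe.2 (List.perm_append_singleton 0 (pvFlatA peptide)).symm
  rw [hm]
  ring
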